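-- pv_equiv track=rewrite | github.com/lengff123/bibtex-tidy | bib_tidy/main.py | standardize_author_name
-- ===== SOURCE A (Python) =====
-- def standardize_author_name(author: str) -> str:
--     """标准化作者姓名格式"""
--     if not author:
--         return author
--
--     # 移除多余的大括号
--     author = author.strip('{}')
--
--     # 处理新格式 (Family=X and Given=Y)
--     if 'Family=' in author:
--         names = []
--         current_author = {}  # 存储当前作者的各个组成部分
--
--         # 按 and 分割多个作者
--         for part in author.split(' and '):
--             # 解析每个作者的组成部分(Family/Given/Prefix等)
--             for component in part.split(' '):
--                 if '=' in component:
--                     key, value = component.split('=')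
--                     current_author[key.lower()] = value
--
--             # 组装当前作者的完整名字
--             if current_author:
--                 name_parts = []
--                 # 如果有前缀且需要使用前缀
--                 if current_author.get('prefix') and current_author.get('useprefix', '').lower() == 'true':
--                     name_parts.append(current_author['prefix'])
--                 # 添加姓氏
--                 if current_author.get('family'):
--                     name_parts.append(current_author['family'])
--                 # 添加名字
--                 if current_author.get('given'):
--                     name_parts.append(current_author['given'])
--
--                 # 将所有部分用逗号连接
--                 names.append(', '.join(filter(None, name_parts)))
--                 current_author = {}  # 重置当前作者信息
--
--         return ' and '.join(names)
--
--     # 处理标准格式 (Lastname, Firstname and Lastname, Firstname)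
--     elif ' and ' in author:
--         # 直接返回标准格式
--         return author
--
--     # 处理错误格式 (Chen and Chiu-hung)
--     else:
--         parts = author.split(' and ')
--         formatted_names = []
--
--         # 每两个部分组成一个完整的姓名
--         for i in range(0, len(parts), 2):
--             if i + 1 < len(parts):
--                 surname = parts[i].strip()
--                 given_name = parts[i + 1].strip()
--                 formatted_names.append(f"{surname}, {given_name}")
--
--         return ' and '.join(formatted_names)
-- ===== SOURCE B (Python) =====
-- def _pairup(items):
--     """Group a list two at a time, dropping a trailing odd element."""
--     if len(items) < 2:
--         return []
--     return [(items[0], items[1])] + _pairup(items[2:])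
--
--
-- def standardize_author_name(author: str) -> str:
--     """Standardize author name format (dict-free, two-phase re-implementation)."""
--     if not author:
--         return author
--
--     author = author.strip('{}')
--
--     if 'Family=' in author:
--         names = []
--         for part in author.split(' and '):
--             # phase 1: collect (lowercased key, value) pairs from '=' components
--             pairs = []
--             for component in part.split(' '):
--                 if '=' in component:
--                     key, value = component.split('=')
--                     pairs.append((key.lower(), value))
--             if pairs:
--                 # phase 2: assemble; last occurrence of a key wins
--                 def last(k):
--                     for key, value in reversed(pairs):
--                         if key == k:
--                             return value
--                     return ''
--                 pfx = last('prefix') if last('useprefix').lower() == 'true' else ''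
--                 fields = (pfx, last('family'), last('given'))
--                 names.append(', '.join(v for v in fields if v))
--         return ' and '.join(names)
--
--     elif ' and ' in author:
--         return author
--
--     else:
--         parts = [p.strip() for p in author.split(' and ')]
--         return ' and '.join(f"{s}, {g}" for s, g in _pairup(parts))
-- ===== Notes on version B (the rewrite author's own statement) =====
-- stated objective: alternative
-- what changed: B replaces A's mutable running dict with a per-part list of (key, value) pairs queried by last-occurrence lookup at assembly time, and replaces A's index-stepping pairing loop in the fallback branch with a recursive two-at-a-time pairing helper.
import Mathlib
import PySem

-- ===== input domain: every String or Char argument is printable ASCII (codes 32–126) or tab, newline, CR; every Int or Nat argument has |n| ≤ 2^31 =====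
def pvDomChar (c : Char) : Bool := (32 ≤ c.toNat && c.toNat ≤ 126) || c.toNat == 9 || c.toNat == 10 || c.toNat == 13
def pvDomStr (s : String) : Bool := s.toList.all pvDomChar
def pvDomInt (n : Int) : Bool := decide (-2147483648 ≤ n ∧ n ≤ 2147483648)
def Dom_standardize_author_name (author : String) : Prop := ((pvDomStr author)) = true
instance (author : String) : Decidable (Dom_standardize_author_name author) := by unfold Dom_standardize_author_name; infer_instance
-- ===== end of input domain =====

-- B replaces A's mutable running dict with a per-part pair list queried by last-occurrence
-- lookup, and replaces A's index-stepping pairing loop with a recursive two-at-a-time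
-- pairing helper (objective: alternative; same asymptotic cost).

-- ===== PORT A =====
def standardize_author_name (author : String) : String :=
  -- if not author: return author
  if author.toList = [] then author else
  -- author = author.strip('{}')
  let cs := PySem.Chars.stripChars author.toList ("{}".toList)
  -- if 'Family=' in author:
  if PySem.Chars.isIn ("Family=".toList) cs then
    let st :=
      (PySem.Chars.splitOn cs (" and ".toList)).foldl
        (fun (st : List (List Char) × PySem.Dict (List Char) (List Char)) part =>
          let cur :=
            (PySem.Chars.splitOn part [' ']).foldl
              (fun (d : PySem.Dict (List Char) (List Char)) comp =>
                if PySem.Chars.isIn ['='] comp then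
                  -- key, value = component.split('=')  (raises unless exactly 2 pieces;
                  -- the length-2 guard is a totality guard, Pre_ puts us inside it)
                  let pieces := PySem.Chars.splitOn comp ['=']
                  if pieces.length = 2 then
                    d.insert (PySem.Chars.lower (pieces.headD [])) (pieces.tail.headD [])
                  else d
                else d)
              st.2
          -- if current_author:
          if cur.items = [] then (st.1, cur)
          else
            let np0 : List (List Char) := []
            let np1 := if cur.getD ("prefix".toList) [] ≠ [] ∧
                          PySem.Chars.lower (cur.getD ("useprefix".toList) []) = "true".toList
                       then np0 ++ [cur.getD ("prefix".toList) []] else np0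
            let np2 := if cur.getD ("family".toList) [] ≠ [] then np1 ++ [cur.getD ("family".toList) []] else np1
            let np3 := if cur.getD ("given".toList) [] ≠ [] then np2 ++ [cur.getD ("given".toList) []] else np2
            (st.1 ++ [PySem.Chars.join (", ".toList) (np3.filter (· ≠ []))], PySem.Dict.empty))
        ([], PySem.Dict.empty)
    String.ofList (PySem.Chars.join (" and ".toList) st.1)
  -- elif ' and ' in author: return author
  else if PySem.Chars.isIn (" and ".toList) cs then String.ofList cs
  else
    let parts := PySem.Chars.splitOn cs (" and ".toList)
    let formatted :=
      (PySem.List.pyRange 0 (parts.length : Int) 2).foldl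
        (fun (acc : List (List Char)) i =>
          if i + 1 < (parts.length : Int) then
            acc ++ [PySem.Chars.strip (PySem.List.pyGetD parts i []) ++ ", ".toList ++
                    PySem.Chars.strip (PySem.List.pyGetD parts (i + 1) [])]
          else acc)
        []
    String.ofList (PySem.Chars.join (" and ".toList) formatted)

-- ===== PORT B =====
-- B's `last`: scan reversed(pairs) for the first matching key, '' if absent
def pvLast (k : List Char) : List (List Char × List Char) → List Char
  | [] => []
  | p :: ps => if p.1 = k then p.2 else pvLast k ps

-- B's `_pairup`: group two at a time, dropping a trailing odd element
def pvPairup : List (List Char) → List (List Char × List Char)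
  | a :: b :: rest => (a, b) :: pvPairup rest
  | _ => []

def standardize_author_name_alt (author : String) : String :=
  if author.toList = [] then author else
  let cs := PySem.Chars.stripChars author.toList ("{}".toList)
  if PySem.Chars.isIn ("Family=".toList) cs then
    let names :=
      (PySem.Chars.splitOn cs (" and ".toList)).foldl
        (fun (names : List (List Char)) part =>
          -- phase 1: collect (lowercased key, value) pairs
          let pairs :=
            (PySem.Chars.splitOn part [' ']).foldl
              (fun (ps : List (List Char × List Char)) comp =>
                if PySem.Chars.isIn ['='] comp then
                  let pieces := PySem.Chars.splitOn comp ['=']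
                  ps ++ [(PySem.Chars.lower (pieces.headD []), pieces.tail.headD [])]
                else ps)
              []
          if pairs = [] then names
          else
            -- phase 2: assemble; last occurrence of a key wins
            let pfx := if PySem.Chars.lower (pvLast ("useprefix".toList) pairs.reverse) = "true".toList
                       then pvLast ("prefix".toList) pairs.reverse else []
            let fields := [pfx, pvLast ("family".toList) pairs.reverse, pvLast ("given".toList) pairs.reverse]
            names ++ [PySem.Chars.join (", ".toList) (fields.filter (· ≠ []))])
        []
    String.ofList (PySem.Chars.join (" and ".toList) names)
  else if PySem.Chars.isIn (" and ".toList) cs then String.ofList cs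
  else
    let parts := (PySem.Chars.splitOn cs (" and ".toList)).map PySem.Chars.strip
    String.ofList (PySem.Chars.join (" and ".toList)
      ((pvPairup parts).map (fun p => p.1 ++ ", ".toList ++ p.2)))

-- ===== PRECONDITION & SPEC =====
-- Pre_ excludes exactly the inputs on which A raises ValueError: in the Family branch, a
-- space-separated component holding two or more equals signs makes the two-name tuple
-- unpacking of its split raise.
def Pre_standardize_author_name (author : String) : Prop :=
  PySem.Chars.isIn ("Family=".toList) (PySem.Chars.stripChars author.toList ("{}".toList)) = true →
    ∀ part ∈ PySem.Chars.splitOn (PySem.Chars.stripChars author.toList ("{}".toList)) (" and ".toList),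
      ∀ comp ∈ PySem.Chars.splitOn part [' '],
        PySem.Chars.isIn ['='] comp = true → (PySem.Chars.splitOn comp ['=']).length = 2
instance (author : String) : Decidable (Pre_standardize_author_name author) := by
  unfold Pre_standardize_author_name; infer_instance

def pvWitness_standardize_author_name : String := "Family=Chen Given=Li and Family=Smith"

def Spec_standardize_author_name (author : String) (out : String) : Prop :=
  out = standardize_author_name_alt author
instance (author : String) (out : String) : Decidable (Spec_standardize_author_name author out) := by
  unfold Spec_standardize_author_name; infer_instance

-- ===== CLAIM (what is proved, stated in full; the proofs are below) =====
def Claim_equal_standardize_author_name : Prop :=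
  ∀ (author : String), Dom_standardize_author_name author →
    Pre_standardize_author_name author →
      Spec_standardize_author_name author (standardize_author_name author)

-- ===== LEMMAS AND PROOFS =====

-- Option-valued first-match lookup (proof helper)
def pvLook (k : List Char) : List (List Char × List Char) → Option (List Char)
  | [] => none
  | p :: ps => if p.1 = k then some p.2 else pvLook k ps

theorem pvLast_eq_look (k : List Char) (l : List (List Char × List Char)) :
    pvLast k l = (pvLook k l).getD [] := by
  induction l with
  | nil => rfl
  | cons p ps ih => by_cases h : p.1 = k <;> simp [pvLast, pvLook, h, ih]

theorem pvLook_append (k : List Char) (l₁ l₂ : List (List Char × List Char)) :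
    pvLook k (l₁ ++ l₂) = (pvLook k l₁).or (pvLook k l₂) := by
  induction l₁ with
  | nil => simp [pvLook]
  | cons p ps ih => by_cases h : p.1 = k <;> simp [pvLook, h, ih]

-- folding inserts: lookup = last-occurrence lookup, falling back to the start dict
theorem foldIns_get? (l : List (List Char × List Char)) (d : PySem.Dict (List Char) (List Char))
    (k : List Char) :
    (l.foldl (fun d p => d.insert p.1 p.2) d).get? k = (pvLook k l.reverse).or (d.get? k) := by
  induction l generalizing d with
  | nil => simp [pvLook]
  | cons p ps ih =>
      simp only [List.foldl_cons, List.reverse_cons, ih, pvLook_append]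
      by_cases h : p.1 = k
      · subst h
        simp [pvLook]
      · simp [pvLook, h, PySem.Dict.get?_insert, Ne.symm h]

theorem foldIns_items_nil (l : List (List Char × List Char)) (d : PySem.Dict (List Char) (List Char)) :
    (l.foldl (fun d p => d.insert p.1 p.2) d).items = [] ↔ l = [] ∧ d.items = [] := by
  induction l generalizing d with
  | nil => simp
  | cons p ps ih =>
      simp only [List.foldl_cons, ih]
      constructor
      · rintro ⟨rfl, h⟩
        have : (d.insert p.1 p.2).items ≠ [] := by
          rw [PySem.Dict.items_insert]
          split
          · rename_i hc
            intro hmap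
            rw [List.map_eq_nil_iff] at hmap
            rw [PySem.Dict.contains_iff_mem_keys] at hc
            simp only [PySem.Dict.keys, hmap] at hc
            simp at hc
          · simp
        exact absurd h this
      · rintro ⟨h, _⟩; simp at h
  -- (the cons case is impossible on both sides)

-- the inner comp-fold of A equals folding inserts over B's pair list
theorem pvInnerA_eq (comps : List (List Char)) (d : PySem.Dict (List Char) (List Char))
    (h : ∀ comp ∈ comps, PySem.Chars.isIn ['='] comp = true →
          (PySem.Chars.splitOn comp ['=']).length = 2) :
    comps.foldl
      (fun (d : PySem.Dict (List Char) (List Char)) comp =>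
        if PySem.Chars.isIn ['='] comp then
          if (PySem.Chars.splitOn comp ['=']).length = 2 then
            d.insert (PySem.Chars.lower ((PySem.Chars.splitOn comp ['=']).headD []))
              ((PySem.Chars.splitOn comp ['=']).tail.headD [])
          else d
        else d) d
    = (comps.foldl
        (fun (ps : List (List Char × List Char)) comp =>
          if PySem.Chars.isIn ['='] comp then
            ps ++ [(PySem.Chars.lower ((PySem.Chars.splitOn comp ['=']).headD []),
                    (PySem.Chars.splitOn comp ['=']).tail.headD [])]
          else ps) []).foldl (fun d p => d.insert p.1 p.2) d := by
  rw [PySem.List.foldl_append_if (fun comp => PySem.Chars.isIn ['='] comp)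
        (fun comp => (PySem.Chars.lower ((PySem.Chars.splitOn comp ['=']).headD []),
                      (PySem.Chars.splitOn comp ['=']).tail.headD []))]
  simp only [List.nil_append]
  induction comps generalizing d with
  | nil => rfl
  | cons c rest ih =>
      have hc := h c (by simp)
      have hrest : ∀ comp ∈ rest, PySem.Chars.isIn ['='] comp = true →
          (PySem.Chars.splitOn comp ['=']).length = 2 :=
        fun comp hm => h comp (by simp [hm])
      by_cases hin : PySem.Chars.isIn ['='] c
      · simp only [List.foldl_cons, List.filter_cons, hin, hc hin, if_true,
          List.map_cons]
        exact ih _ hrest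
      · simp only [List.foldl_cons, List.filter_cons, hin, Bool.false_eq_true, if_false]
        exact ih _ hrest

-- the per-part assembled names agree
theorem pvFields_eq (P F G : List Char) (U : Prop) [Decidable U] :
    ((if G ≠ [] then
        (if F ≠ [] then (if P ≠ [] ∧ U then ([] : List (List Char)) ++ [P] else []) ++ [F]
         else if P ≠ [] ∧ U then [] ++ [P] else []) ++ [G]
      else if F ≠ [] then (if P ≠ [] ∧ U then [] ++ [P] else []) ++ [F]
      else if P ≠ [] ∧ U then [] ++ [P] else []).filter (· ≠ []))
    = ([if U then P else [], F, G]).filter (· ≠ []) := by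
  by_cases hU : U <;> by_cases hP : P = [] <;> by_cases hF : F = [] <;> by_cases hG : G = [] <;>
    simp [hU, hP, hF, hG, List.filter]

-- splitOn with a separator that does not occur returns the whole string
theorem pvSplitOnGo_not_in (sep : List Char) (fuel : Nat) (l cur acc : _)
    (h : ¬ sep <:+: l) :
    PySem.Chars.splitOn.go sep fuel l cur acc = ((cur.reverse ++ l) :: acc).reverse := by
  induction fuel generalizing l cur acc with
  | zero => rw [PySem.Chars.splitOn.go]
  | succ n ih =>
      cases l with
      | nil => simp [PySem.Chars.splitOn.go]
      | cons c rest =>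
          rw [PySem.Chars.splitOn.go]
          have hpre : sep.isPrefixOf (c :: rest) = false := by
            rw [Bool.eq_false_iff]
            intro hp
            exact h ((List.isPrefixOf_iff_prefix.mp hp).isInfix)
          rw [if_neg (by simp [hpre])]
          rw [ih rest (c :: cur) acc (fun hi => h (List.infix_cons hi))]
          simp

theorem pvSplitOn_not_in (cs sep : List Char) (h : ¬ sep <:+: cs) :
    PySem.Chars.splitOn cs sep = [cs] := by
  rw [PySem.Chars.splitOn, pvSplitOnGo_not_in sep _ _ _ _ h]
  simp

-- the whole 'Family=' branch: A's (names, dict) fold equals B's names fold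
theorem pvFamily_eq : ∀ (parts : List (List Char)),
    (∀ part ∈ parts, ∀ comp ∈ PySem.Chars.splitOn part [' '],
        PySem.Chars.isIn ['='] comp = true → (PySem.Chars.splitOn comp ['=']).length = 2) →
    ∀ names : List (List Char),
      (parts.foldl
        (fun (st : List (List Char) × PySem.Dict (List Char) (List Char)) part =>
          let cur :=
            (PySem.Chars.splitOn part [' ']).foldl
              (fun (d : PySem.Dict (List Char) (List Char)) comp =>
                if PySem.Chars.isIn ['='] comp then
                  let pieces := PySem.Chars.splitOn comp ['=']
                  if pieces.length = 2 then
                    d.insert (PySem.Chars.lower (pieces.headD [])) (pieces.tail.headD [])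
                  else d
                else d)
              st.2
          if cur.items = [] then (st.1, cur)
          else
            let np0 : List (List Char) := []
            let np1 := if cur.getD ("prefix".toList) [] ≠ [] ∧
                          PySem.Chars.lower (cur.getD ("useprefix".toList) []) = "true".toList
                       then np0 ++ [cur.getD ("prefix".toList) []] else np0
            let np2 := if cur.getD ("family".toList) [] ≠ [] then np1 ++ [cur.getD ("family".toList) []] else np1
            let np3 := if cur.getD ("given".toList) [] ≠ [] then np2 ++ [cur.getD ("given".toList) []] else np2
            (st.1 ++ [PySem.Chars.join (", ".toList) (np3.filter (· ≠ []))], PySem.Dict.empty))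
        (names, PySem.Dict.empty)).1
      = parts.foldl
          (fun (names : List (List Char)) part =>
            let pairs :=
              (PySem.Chars.splitOn part [' ']).foldl
                (fun (ps : List (List Char × List Char)) comp =>
                  if PySem.Chars.isIn ['='] comp then
                    let pieces := PySem.Chars.splitOn comp ['=']
                    ps ++ [(PySem.Chars.lower (pieces.headD []), pieces.tail.headD [])]
                  else ps)
                []
            if pairs = [] then names
            else
              let pfx := if PySem.Chars.lower (pvLast ("useprefix".toList) pairs.reverse) = "true".toList
                         then pvLast ("prefix".toList) pairs.reverse else []
              let fields := [pfx, pvLast ("family".toList) pairs.reverse, pvLast ("given".toList) pairs.reverse]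
              names ++ [PySem.Chars.join (", ".toList) (fields.filter (· ≠ []))])
          names := by
  intro parts
  induction parts with
  | nil => intro _ names; rfl
  | cons part rest ih =>
      intro h names
      have hpart := h part (by simp)
      have hrest : ∀ p ∈ rest, ∀ comp ∈ PySem.Chars.splitOn p [' '],
          PySem.Chars.isIn ['='] comp = true → (PySem.Chars.splitOn comp ['=']).length = 2 :=
        fun p hp => h p (List.mem_cons_of_mem _ hp)
      simp only [List.foldl_cons]
      rw [pvInnerA_eq _ _ hpart]
      by_cases hps :
          ((PySem.Chars.splitOn part [' ']).foldl
            (fun (ps : List (List Char × List Char)) comp =>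
              if PySem.Chars.isIn ['='] comp then
                ps ++ [(PySem.Chars.lower ((PySem.Chars.splitOn comp ['=']).headD []),
                        (PySem.Chars.splitOn comp ['=']).tail.headD [])]
              else ps)
            []) = []
      · rw [hps]
        simp only [List.foldl_nil]
        have h1 : (PySem.Dict.empty : PySem.Dict (List Char) (List Char)).items =
            ([] : List (List Char × List Char)) := rfl
        rw [if_pos h1, if_pos True.intro]
        exact ih hrest names
      · rw [if_neg (by rw [foldIns_items_nil]; rintro ⟨h1, _⟩; exact hps h1),
            if_neg hps]
        simp only [PySem.Dict.getD_eq_get?_getD, foldIns_get?, PySem.Dict.get?_empty,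
          Option.or_none, ← pvLast_eq_look]
        rw [pvFields_eq]
        exact ih hrest _

theorem standardize_author_name_spec : Claim_equal_standardize_author_name := by
  intro author hDom hPre
  unfold Spec_standardize_author_name standardize_author_name standardize_author_name_alt
  by_cases hnil : author.toList = []
  · rw [if_pos hnil, if_pos hnil]
  · rw [if_neg hnil, if_neg hnil]
    by_cases hfam : PySem.Chars.isIn ("Family=".toList)
        (PySem.Chars.stripChars author.toList ("{}".toList)) = true
    · rw [if_pos hfam, if_pos hfam]
      exact congrArg (fun l => String.ofList (PySem.Chars.join (" and ".toList) l))
        (pvFamily_eq _ (hPre hfam) [])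
    · rw [if_neg hfam, if_neg hfam]
      by_cases hand : PySem.Chars.isIn (" and ".toList)
          (PySem.Chars.stripChars author.toList ("{}".toList)) = true
      · rw [if_pos hand, if_pos hand]
      · rw [if_neg hand, if_neg hand]
        rw [pvSplitOn_not_in _ _
          ((PySem.Chars.isIn_eq_false_iff _ _).mp (Bool.eq_false_iff.mpr hand))]
        norm_num [PySem.List.pyRange, pvPairup, PySem.Chars.join]
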